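-- pv_equiv track=rewrite | github.com/rafald1/advent_of_code_2023 | day_18_lavaduct_lagoon/18_lavaduct_lagoon.py | dig_border
-- ===== SOURCE A (Python) =====
-- def dig_border(plan):
--     directions = {'U': (0, -1), 'R': (1, 0), 'D': (0, 1), 'L': (-1, 0)}
--     border = [(0, 0)]
--     for direction, length in plan:
--         dx, dy = directions[direction]
--         x, y = border[-1]
--         border += [(x + dx * i, y + dy * i) for i in range(1, length + 1)]
--
--     return border  # first and last element are the same, so border length is one less
-- ===== SOURCE B (Python) =====
-- def dig_border(plan):
--     directions = {'U': (0, -1), 'R': (1, 0), 'D': (0, 1), 'L': (-1, 0)}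
--     deltas = [directions[d] for d, length in plan for _ in range(length)]
--     border = [(0, 0)]
--     x = y = 0
--     for dx, dy in deltas:
--         x += dx
--         y += dy
--         border.append((x, y))
--     return border
-- ===== Notes on version B (the rewrite author's own statement) =====
-- stated objective: alternative
-- what changed: Replaces A's per-segment closed-form comprehension (x + dx*i for i in 1..length, re-reading border[-1] each segment) by a flatten-then-scan structure: first build a flat list of unit step deltas, then one running prefix-sum pass producing the border.
import Mathlib
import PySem

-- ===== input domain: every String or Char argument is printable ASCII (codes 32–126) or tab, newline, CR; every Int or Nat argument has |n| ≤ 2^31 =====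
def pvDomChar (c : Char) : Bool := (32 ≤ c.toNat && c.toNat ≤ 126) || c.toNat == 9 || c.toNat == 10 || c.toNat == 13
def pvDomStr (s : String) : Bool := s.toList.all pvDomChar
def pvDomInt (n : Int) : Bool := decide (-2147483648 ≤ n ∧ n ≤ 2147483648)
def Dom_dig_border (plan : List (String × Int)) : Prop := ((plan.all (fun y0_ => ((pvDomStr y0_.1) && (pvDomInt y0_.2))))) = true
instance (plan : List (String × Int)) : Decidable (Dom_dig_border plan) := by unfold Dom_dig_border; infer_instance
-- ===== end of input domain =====

-- B changes the decomposition (flatten unit deltas, then one prefix-sum scan) with the same cost; return value only, no mutation visible to the caller.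

-- ===== PORT A =====
def digDirections : PySem.Dict String (Int × Int) :=
  PySem.Dict.ofList [("U", (0, -1)), ("R", (1, 0)), ("D", (0, 1)), ("L", (-1, 0))]

def dig_border (plan : List (String × Int)) : List (Int × Int) :=
  plan.foldl
    (fun border p =>
      let d := digDirections.getD p.1 (0, 0)
      let xy := (PySem.List.pyGet? border (-1)).getD (0, 0)
      border ++ (PySem.List.pyRange 1 (p.2 + 1) 1).map (fun i => (xy.1 + d.1 * i, xy.2 + d.2 * i)))
    [(0, 0)]

-- ===== PORT B =====
def digDirectionsB : PySem.Dict String (Int × Int) :=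
  PySem.Dict.ofList [("U", (0, -1)), ("R", (1, 0)), ("D", (0, 1)), ("L", (-1, 0))]

def digScanStep (st : (Int × Int) × List (Int × Int)) (d : Int × Int) :
    (Int × Int) × List (Int × Int) :=
  let nxt := (st.1.1 + d.1, st.1.2 + d.2)
  (nxt, st.2 ++ [nxt])

def dig_border_alt (plan : List (String × Int)) : List (Int × Int) :=
  let deltas := plan.flatMap
    (fun p => (PySem.List.pyRange 0 p.2 1).map (fun _ => digDirectionsB.getD p.1 (0, 0)))
  (deltas.foldl digScanStep ((0, 0), [(0, 0)])).2

-- ===== PRECONDITION & SPEC =====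
-- Pre_ excludes exactly the plans containing a direction other than 'U','R','D','L', on which A raises KeyError.
def Pre_dig_border (plan : List (String × Int)) : Prop :=
  (plan.all (fun p => p.1 == "U" || p.1 == "R" || p.1 == "D" || p.1 == "L")) = true
instance (plan : List (String × Int)) : Decidable (Pre_dig_border plan) := by
  unfold Pre_dig_border; infer_instance
def pvWitness_dig_border : (List (String × Int)) := [("R", 3), ("D", 2), ("L", 1)]

def Spec_dig_border (plan : List (String × Int)) (out : List (Int × Int)) : Prop := out = dig_border_alt plan
instance (plan : List (String × Int)) (out : List (Int × Int)) : Decidable (Spec_dig_border plan out) := by unfold Spec_dig_border; infer_instance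

-- ===== CLAIM (what is proved, stated in full; the proofs are below) =====
def Claim_equal_dig_border : Prop := ∀ (plan : List (String × Int)), Dom_dig_border plan → Pre_dig_border plan → Spec_dig_border plan (dig_border plan)

-- ===== LEMMAS AND PROOFS =====

/-- Scanning `m` copies of a constant delta `d` from state `(pos, acc)`. -/
theorem digScan_replicate (m : Nat) (d pos : Int × Int) (acc : List (Int × Int)) :
    (List.replicate m d).foldl digScanStep (pos, acc) =
      ((pos.1 + d.1 * m, pos.2 + d.2 * m),
       acc ++ (List.range m).map
         (fun k : Nat => (pos.1 + d.1 * ((k : Int) + 1), pos.2 + d.2 * ((k : Int) + 1)))) := by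
  induction m generalizing pos acc with
  | zero => simp
  | succ n ih =>
    rw [List.replicate_succ, List.foldl_cons]
    show (List.replicate n d).foldl digScanStep
        ((pos.1 + d.1, pos.2 + d.2), acc ++ [(pos.1 + d.1, pos.2 + d.2)]) = _
    rw [ih, List.range_succ_eq_map, List.map_cons, List.map_map,
        List.append_assoc, List.singleton_append]
    simp only [Prod.mk.injEq]
    refine ⟨⟨by push_cast; ring, by push_cast; ring⟩, ?_⟩
    congr 1
    congr 1
    · norm_num
    · apply List.map_congr_left; intro k _
      simp only [Function.comp, Prod.mk.injEq, Nat.succ_eq_add_one]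
      push_cast
      exact ⟨by ring, by ring⟩

/-- A constant-valued map over a list is a replicate. -/
theorem map_const_eq_replicate {α β : Type} (l : List α) (d : β) :
    l.map (fun _ => d) = List.replicate l.length d := by
  induction l with
  | nil => rfl
  | cons a t ih => simp [ih, List.replicate_succ]

theorem dig_main (plan : List (String × Int)) (pos : Int × Int) (acc : List (Int × Int)) :
    plan.foldl
      (fun border p =>
        let d := digDirections.getD p.1 (0, 0)
        let xy := (PySem.List.pyGet? border (-1)).getD (0, 0)
        border ++ (PySem.List.pyRange 1 (p.2 + 1) 1).map
          (fun i => (xy.1 + d.1 * i, xy.2 + d.2 * i)))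
      (acc ++ [pos]) =
    ((plan.flatMap
        (fun p => (PySem.List.pyRange 0 p.2 1).map (fun _ => digDirectionsB.getD p.1 (0, 0)))).foldl
      digScanStep (pos, acc ++ [pos])).2 := by
  induction plan generalizing pos acc with
  | nil => simp
  | cons p rest ih =>
    rw [List.flatMap_cons, List.foldl_append, List.foldl_cons]
    dsimp only
    rw [show digDirectionsB = digDirections from rfl]
    set d := digDirections.getD p.1 (0, 0) with hd
    rw [PySem.List.pyGet?_neg_one_append_singleton, Option.getD_some]
    have hm : (PySem.List.pyRange 0 p.2 1).map (fun _ => d) = List.replicate p.2.toNat d := by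
      rw [map_const_eq_replicate, PySem.List.length_pyRange_one]
      norm_num
    rw [hm, digScan_replicate]
    have hA : (PySem.List.pyRange 1 (p.2 + 1) 1).map
        (fun i => (pos.1 + d.1 * i, pos.2 + d.2 * i)) =
        (List.range p.2.toNat).map
          (fun k : Nat => (pos.1 + d.1 * ((k : Int) + 1), pos.2 + d.2 * ((k : Int) + 1))) := by
      rw [PySem.List.pyRange_one, List.map_map]
      rw [show (p.2 + 1 - 1).toNat = p.2.toNat by omega]
      apply List.map_congr_left; intro k _
      simp only [Function.comp, Prod.mk.injEq]
      exact ⟨by ring, by ring⟩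
    rw [hA]
    rcases Nat.eq_zero_or_pos p.2.toNat with h0 | hpos
    · rw [h0]
      simpa using ih pos acc
    · obtain ⟨n, hn⟩ : ∃ n, p.2.toNat = n + 1 := ⟨p.2.toNat - 1, by omega⟩
      rw [hn, List.range_succ, List.map_append, List.map_singleton, ← List.append_assoc]
      push_cast
      exact ih (pos.1 + d.1 * ((n : Int) + 1), pos.2 + d.2 * ((n : Int) + 1))
        ((acc ++ [pos]) ++ (List.range n).map
          (fun k : Nat => (pos.1 + d.1 * ((k : Int) + 1), pos.2 + d.2 * ((k : Int) + 1))))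

-- ===== VERDICT (by name: the statement is the Claim_ definition above) =====
theorem dig_border_spec : Claim_equal_dig_border := by
  intro plan _ _
  show dig_border plan = dig_border_alt plan
  unfold dig_border dig_border_alt
  simpa using dig_main plan (0, 0) []
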